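-- pv_equiv track=rewrite | github.com/MelvinSiaw/Algorithms_Assgiment | src/generator/searching/binary_search_step.py | binary_search_trace
-- ===== SOURCE A (Python) =====
-- from typing import List, Tuple
--
-- def binary_search_trace(data: List[Tuple[int, str]], target: int) -> List[str]:
--     """Perform binary search and return trace of comparisons with index and value."""
--     trace = []
--     left, right = 0, len(data) - 1
--
--     while left <= right:
--         mid = (left + right) // 2
--         mid_val = data[mid][0]
--         trace.append(f"{mid}: {mid_val}/{data[mid][1]}")
--
--         if mid_val == target:
--             return trace
--         elif mid_val < target:
--             left = mid + 1
--         else: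
--             right = mid - 1
--
--     trace.append("-1")  # target not found
--     return trace
-- ===== SOURCE B (Python) =====
-- def binary_search_trace(data, target):
--     """Staged binary search: first compute the probed index path and a found flag
--     recursively, then render the probe strings in a separate formatting pass,
--     finally add the not-found sentinel."""
--     def path(lo, hi):
--         if lo > hi:
--             return [], False
--         mid = (lo + hi) // 2
--         v = data[mid][0]
--         if v == target:
--             return [mid], True
--         rest, found = path(mid + 1, hi) if v < target else path(lo, mid - 1)
--         return [mid] + rest, found
--
--     idxs, found = path(0, len(data) - 1)
--     trace = ["{}: {}/{}".format(i, data[i][0], data[i][1]) for i in idxs]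
--     return trace if found else trace + ["-1"]
-- ===== Notes on version B (the rewrite author's own statement) =====
-- stated objective: alternative
-- what changed: Replaced A's single imperative while-loop that formats and appends probe strings into a shared mutable trace by a staged design: a pure recursive helper computes only the list of probed indices plus a found flag, a separate comprehension pass renders those indices into probe strings, and the sentinel is added by a final conditional.
import Mathlib
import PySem

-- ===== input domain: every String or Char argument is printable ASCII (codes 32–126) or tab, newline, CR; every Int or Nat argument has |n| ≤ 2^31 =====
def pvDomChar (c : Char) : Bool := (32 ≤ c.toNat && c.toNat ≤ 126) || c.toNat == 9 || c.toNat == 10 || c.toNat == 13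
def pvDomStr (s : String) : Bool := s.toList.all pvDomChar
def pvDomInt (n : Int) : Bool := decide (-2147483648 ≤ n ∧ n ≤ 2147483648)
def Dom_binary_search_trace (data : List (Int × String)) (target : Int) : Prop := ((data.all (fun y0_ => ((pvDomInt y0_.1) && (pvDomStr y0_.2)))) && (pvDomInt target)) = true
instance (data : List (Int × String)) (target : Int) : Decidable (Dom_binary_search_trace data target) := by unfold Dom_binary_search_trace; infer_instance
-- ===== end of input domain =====

-- B restructures A's one imperative format-and-append while-loop into three stages:
-- a recursive index-path + found-flag computation, a separate formatting pass, and a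
-- final sentinel conditional (alternative decomposition, same cost).

-- ===== PORT A =====
-- the while-loop of A: state (left, right, trace); terminates because the range shrinks
def bstLoopA (data : List (Int × String)) (target : Int) (left right : Int) (trace : List String) : List String :=
  if _h : left ≤ right then
    let mid := PySem.Int.floordiv (left + right) 2
    match PySem.List.pyGet? data mid with
    | none => trace  -- data[mid] raises IndexError in Python; unreachable from the entry call
    | some mv =>
      let trace' := trace ++ [PySem.Int.toStr mid ++ ": " ++ PySem.Int.toStr mv.1 ++ "/" ++ mv.2]
      if mv.1 == target then trace'
      else if mv.1 < target then bstLoopA data target (mid + 1) right trace'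
      else bstLoopA data target left (mid - 1) trace'
  else trace ++ ["-1"]
termination_by (right + 1 - left).toNat
decreasing_by
  · have := PySem.Int.floordiv_two_mid_bounds _h; omega
  · have := PySem.Int.floordiv_two_mid_bounds _h; omega

def binary_search_trace (data : List (Int × String)) (target : Int) : List String :=
  bstLoopA data target 0 ((data.length : Int) - 1) []

-- ===== PORT B =====
-- Source B's helper path(lo, hi): the probed indices and whether the target was found
def bstPath (data : List (Int × String)) (target : Int) (lo hi : Int) : List Int × Bool :=
  if _h : lo > hi then ([], false)
  else
    let mid := PySem.Int.floordiv (lo + hi) 2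
    match PySem.List.pyGet? data mid with
    | none => ([], false)  -- data[mid] raises IndexError in Python; unreachable from the entry call
    | some mv =>
      if mv.1 == target then ([mid], true)
      else
        let p := if mv.1 < target then bstPath data target (mid + 1) hi
                 else bstPath data target lo (mid - 1)
        (mid :: p.1, p.2)
termination_by (hi + 1 - lo).toNat
decreasing_by
  · have := PySem.Int.floordiv_two_mid_bounds (by omega : lo ≤ hi); omega
  · have := PySem.Int.floordiv_two_mid_bounds (by omega : lo ≤ hi); omega

-- Source B's formatting comprehension body "{}: {}/{}".format(i, data[i][0], data[i][1])
def bstFmt (data : List (Int × String)) (i : Int) : String :=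
  match PySem.List.pyGet? data i with
  | none => ""  -- data[i] raises IndexError in Python; path never yields such an index
  | some mv => PySem.Int.toStr i ++ ": " ++ PySem.Int.toStr mv.1 ++ "/" ++ mv.2

def binary_search_trace_alt (data : List (Int × String)) (target : Int) : List String :=
  let p := bstPath data target 0 ((data.length : Int) - 1)
  let trace := p.1.map (bstFmt data)
  if p.2 then trace else trace ++ ["-1"]

-- ===== PRECONDITION & SPEC =====
def Spec_binary_search_trace (data : List (Int × String)) (target : Int) (out : List String) : Prop := out = binary_search_trace_alt data target
instance (data : List (Int × String)) (target : Int) (out : List String) : Decidable (Spec_binary_search_trace data target out) := by unfold Spec_binary_search_trace; infer_instance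

-- ===== CLAIM (what is proved, stated in full; the proofs are below) =====
def Claim_equal_binary_search_trace : Prop := ∀ (data : List (Int × String)) (target : Int), Dom_binary_search_trace data target → Spec_binary_search_trace data target (binary_search_trace data target)

-- ===== LEMMAS AND PROOFS =====
-- On in-range search windows the loop-with-accumulator equals the rendered path:
-- trace ++ map fmt path ++ sentinel-if-not-found.
theorem bstLoopA_eq_path (data : List (Int × String)) (target : Int) :
    ∀ (lo hi : Int), 0 ≤ lo → hi < (data.length : Int) → ∀ (trace : List String),
      bstLoopA data target lo hi trace =
        trace ++ ((bstPath data target lo hi).1.map (bstFmt data)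
          ++ (if (bstPath data target lo hi).2 then ([] : List String) else ["-1"])) := by
  intro lo hi
  induction hm : (hi + 1 - lo).toNat using Nat.strong_induction_on generalizing lo hi with
  | _ n ih =>
    intro hlo hhi trace
    rw [bstLoopA, bstPath]
    by_cases h : lo ≤ hi
    · simp only [dif_pos h, dif_neg (by omega : ¬ lo > hi)]
      set m := PySem.Int.floordiv (lo + hi) 2 with hmid
      have hb : lo ≤ m ∧ m ≤ hi := PySem.Int.floordiv_two_mid_bounds h
      have hg : PySem.List.pyGet? data m = some data[m.toNat] :=
        PySem.List.pyGet?_eq_some_getElem data (by omega) (by omega)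
      rw [hg]
      have hfmt : bstFmt data m =
          PySem.Int.toStr m ++ ": " ++ PySem.Int.toStr (data[m.toNat]).1 ++ "/" ++ (data[m.toNat]).2 := by
        unfold bstFmt; rw [hg]
      by_cases he : (data[m.toNat]).1 = target
      · simp [he, hfmt]
      · by_cases hl : (data[m.toNat]).1 < target
        · simp only [beq_iff_eq, he, if_false, hl, if_true]
          rw [ih ((hi + 1 - (m + 1)).toNat) (by omega) (m + 1) hi rfl (by omega) (by omega)]
          simp [hfmt]
        · simp only [beq_iff_eq, he, if_false, hl, if_false]
          rw [ih ((m - 1 + 1 - lo).toNat) (by omega) lo (m - 1) rfl (by omega) (by omega)]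
          simp [hfmt]
    · simp [dif_neg h, dif_pos (by omega : lo > hi)]

-- ===== VERDICT (by name: the statement is the Claim_ definition above) =====
theorem binary_search_trace_spec : Claim_equal_binary_search_trace := by
  intro data target _
  unfold Spec_binary_search_trace binary_search_trace binary_search_trace_alt
  rw [bstLoopA_eq_path data target 0 ((data.length : Int) - 1) (by omega) (by omega) []]
  by_cases hf : (bstPath data target 0 ((data.length : Int) - 1)).2 <;> simp [hf]
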